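-- pv_equiv track=rewrite | github.com/hackers458/dreamhack | Reverse Engineering/level4/Vernichtet/Vernichtet.py | solve
-- ===== SOURCE A (Python) =====
-- def get_neighbors(v2, v3):
--     v4 = v2 if v2 <= 0 else v2 - 1
--     v5 = v2 if v2 > 13 else v2 + 1
--     v6 = v3 if v3 <= 0 else v3 - 1
--     v7 = v3 if v3 > 13 else v3 + 1
--     result = []
--     for m in range(v6, v7 + 1):
--         for n in range(v4, v5 + 1):
--             if m != v3 or n != v2:
--                 result.append((m, n))
--     return result
--
-- def solve(grid, existing, v2, v3, i):
--     if i == 225: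
--         return grid
--
--     neighbors = get_neighbors(v2, v3)
--
--     # 1단계: 고정값 i+1이 이웃에 있으면 우선 이동
--     for m, n in neighbors:
--         if grid[m][n] == i + 1:
--             result = solve(grid, existing, n, m, i + 1)
--             if result is not None:
--                 return result
--
--     # 2단계: 빈칸에 i+1 배치 (중복 방지 + 백트래킹)
--     if (i + 1) not in existing:
--         for m, n in neighbors:
--             if grid[m][n] == -1:
--                 grid[m][n] = i + 1
--                 existing.add(i + 1)
--                 result = solve(grid, existing, n, m, i + 1)
--                 if result is not None:
--                     return result
--                 # 백트래킹
--                 grid[m][n] = -1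
--                 existing.remove(i + 1)
--
--     return None
-- ===== SOURCE B (Python) =====
-- # Iterative re-implementation: explicit stack of frames replaces A's recursion
-- # (same DFS order and same in-place mutation of grid/existing as A).
-- def get_neighbors(v2, v3):
--     v4 = v2 if v2 <= 0 else v2 - 1
--     v5 = v2 if v2 > 13 else v2 + 1
--     v6 = v3 if v3 <= 0 else v3 - 1
--     v7 = v3 if v3 > 13 else v3 + 1
--     result = []
--     for m in range(v6, v7 + 1):
--         for n in range(v4, v5 + 1):
--             if m != v3 or n != v2:
--                 result.append((m, n))
--     return result
--
-- def solve(grid, existing, v2, v3, i):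
--     if i == 225:
--         return grid
--     # frame = [fi, neighbors, idx, phase, undo]; undo = (m, n) set by the
--     # parent's phase-2 placement that created this frame, or None.
--     stack = [[i, get_neighbors(v2, v3), 0, 1, None]]
--     while stack:
--         fr = stack[-1]
--         fi, ns, idx, phase, undo = fr
--         if phase == 1:
--             if idx < len(ns):
--                 fr[2] = idx + 1
--                 m, n = ns[idx]
--                 if grid[m][n] == fi + 1:
--                     if fi + 1 == 225:
--                         return grid
--                     stack.append([fi + 1, get_neighbors(n, m), 0, 1, None])
--             else:
--                 if (fi + 1) in existing:
--                     stack.pop()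
--                     if undo is not None:
--                         um, un = undo
--                         grid[um][un] = -1
--                         existing.remove(fi)
--                 else:
--                     fr[2] = 0
--                     fr[3] = 2
--         else:
--             if idx < len(ns):
--                 fr[2] = idx + 1
--                 m, n = ns[idx]
--                 if grid[m][n] == -1:
--                     grid[m][n] = fi + 1
--                     existing.add(fi + 1)
--                     if fi + 1 == 225:
--                         return grid
--                     stack.append([fi + 1, get_neighbors(n, m), 0, 1, (m, n)])
--             else:
--                 stack.pop()
--                 if undo is not None:
--                     um, un = undo
--                     grid[um][un] = -1
--                     existing.remove(fi)
--     return None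
-- ===== Notes on version B (the rewrite author's own statement) =====
-- stated objective: alternative
-- what changed: The recursive backtracking solver is rewritten as an iterative while-loop over an explicit stack of frames (fi, neighbors, idx, phase, undo), with the undo record restoring grid/existing on pop instead of call-stack unwinding.
-- outside the precondition, e.g. on solve([[1, 97, -1], [2], [], [-1, 82, -2]], set(), -2, -1, 39): A returns None, B returns None; on solve([[8]], {2, 3, 5}, -1, -1, -44): A returns None, B returns None; on solve([[5, 6], [7, 8]], set(), 0, 0, 300): A returns None, B returns None
import Mathlib
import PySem

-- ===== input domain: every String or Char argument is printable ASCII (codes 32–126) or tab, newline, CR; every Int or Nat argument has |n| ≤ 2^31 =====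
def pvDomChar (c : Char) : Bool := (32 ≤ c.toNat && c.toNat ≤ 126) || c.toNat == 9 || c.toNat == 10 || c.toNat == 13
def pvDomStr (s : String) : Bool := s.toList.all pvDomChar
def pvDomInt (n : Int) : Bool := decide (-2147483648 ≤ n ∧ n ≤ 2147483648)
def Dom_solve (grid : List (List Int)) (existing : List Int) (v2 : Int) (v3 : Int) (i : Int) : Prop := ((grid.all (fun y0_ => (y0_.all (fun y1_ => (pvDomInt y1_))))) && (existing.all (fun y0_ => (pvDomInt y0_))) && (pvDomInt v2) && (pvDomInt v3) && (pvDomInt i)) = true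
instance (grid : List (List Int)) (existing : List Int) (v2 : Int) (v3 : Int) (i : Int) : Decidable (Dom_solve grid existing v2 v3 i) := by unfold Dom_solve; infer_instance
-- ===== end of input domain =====

-- B replaces A's recursion by an explicit stack of frames (iterative DFS, same order);
-- equivalence is about the RETURN value (the Pythons also mutate grid/existing in place, identically).

-- ===== PORT A =====
-- helper get_neighbors (shared verbatim by both Pythons)
def getN (v2 v3 : Int) : List (Int × Int) :=
  let v4 := if v2 ≤ 0 then v2 else v2 - 1
  let v5 := if v2 > 13 then v2 else v2 + 1
  let v6 := if v3 ≤ 0 then v3 else v3 - 1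
  let v7 := if v3 > 13 then v3 else v3 + 1
  (PySem.List.pyRange v6 (v7 + 1) 1).foldl (fun acc m =>
    (PySem.List.pyRange v4 (v5 + 1) 1).foldl (fun acc2 n =>
      if m ≠ v3 ∨ n ≠ v2 then acc2 ++ [(m, n)] else acc2) acc) []

-- grid[m][n]  (none = IndexError; such inputs are outside Pre_solve)
def cellGet (g : List (List Int)) (m n : Int) : Option Int :=
  (PySem.List.pyGet? g m).bind fun row => PySem.List.pyGet? row n

-- grid[m][n] = v  (total form; indices are in range under Pre_solve)
def cellSet (g : List (List Int)) (m n : Int) (v : Int) : List (List Int) :=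
  PySem.List.pySetD g m (PySem.List.pySetD (PySem.List.pyGetD g m []) n v)

-- A's recursion, fueled by the recursion depth (225 - i); grid/existing mutation and
-- backtracking restoration become pure threading (the 'none' branch resumes with the old values).
mutual
def solveA (fuel : Nat) (g : List (List Int)) (ex : List Int) (v2 v3 i : Int) : Option (List (List Int)) :=
  match fuel with
  | 0 => none
  | Nat.succ f =>
    if i = 225 then some g
    else
      match ph1 f g ex i (getN v2 v3) with
      | some r => some r
      | none =>
        if ex.contains (i + 1) then none
        else ph2 f g ex i (getN v2 v3)
termination_by (fuel, 0)

def ph1 (fuel : Nat) (g : List (List Int)) (ex : List Int) (i : Int) (l : List (Int × Int)) : Option (List (List Int)) :=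
  match l with
  | [] => none
  | (m, n) :: rest =>
    if cellGet g m n = some (i + 1) then
      match solveA fuel g ex n m (i + 1) with
      | some r => some r
      | none => ph1 fuel g ex i rest
    else ph1 fuel g ex i rest
termination_by (fuel, l.length + 1)

def ph2 (fuel : Nat) (g : List (List Int)) (ex : List Int) (i : Int) (l : List (Int × Int)) : Option (List (List Int)) :=
  match l with
  | [] => none
  | (m, n) :: rest =>
    if cellGet g m n = some (-1) then
      match solveA fuel (cellSet g m n (i + 1)) (PySem.Set.add ex (i + 1)) n m (i + 1) with
      | some r => some r
      | none => ph2 fuel g ex i rest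
    else ph2 fuel g ex i rest
termination_by (fuel, l.length + 1)
end

def solve (grid : List (List Int)) (existing : List Int) (v2 : Int) (v3 : Int) (i : Int) : Option (List (List Int)) :=
  solveA ((225 - i).toNat + 1) grid existing v2 v3 i

-- ===== PORT B =====
-- a stack frame of the iterative solver: [fi, ns, idx, phase, undo]
structure BFrame where
  fi : Int
  ns : List (Int × Int)
  idx : Int
  phase : Int
  undo : Option (Int × Int)
deriving DecidableEq, Repr

-- step fuel for the while loop (the machine is fuel-insensitive once the fuel covers the run)
def bndB : Nat → Nat
  | 0 => 0
  | f + 1 => 18 * bndB f + 20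

-- the while loop; idx is always ≥ 0 and bounds-checked, so pyGetD is exact for ns[idx];
-- set.remove at a pop is exact as discard: the removed element was added by the matching placement.
def loopB : Nat → List (List Int) → List Int → List BFrame → Option (List (List Int))
  | 0, _, _, _ => none
  | _ + 1, _, _, [] => none
  | Nat.succ f, g, ex, fr :: rest =>
    if fr.phase = 1 then
      if fr.idx < PySem.List.len fr.ns then
        let mn := PySem.List.pyGetD fr.ns fr.idx (0, 0)
        let fr' := { fr with idx := fr.idx + 1 }
        if cellGet g mn.1 mn.2 = some (fr.fi + 1) then
          if fr.fi + 1 = 225 then some g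
          else loopB f g ex (⟨fr.fi + 1, getN mn.2 mn.1, 0, 1, none⟩ :: fr' :: rest)
        else loopB f g ex (fr' :: rest)
      else
        if ex.contains (fr.fi + 1) then
          match fr.undo with
          | none => loopB f g ex rest
          | some (um, un) => loopB f (cellSet g um un (-1)) (PySem.Set.discard ex fr.fi) rest
        else loopB f g ex ({ fr with idx := 0, phase := 2 } :: rest)
    else
      if fr.idx < PySem.List.len fr.ns then
        let mn := PySem.List.pyGetD fr.ns fr.idx (0, 0)
        let fr' := { fr with idx := fr.idx + 1 }
        if cellGet g mn.1 mn.2 = some (-1) then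
          let g' := cellSet g mn.1 mn.2 (fr.fi + 1)
          let ex' := PySem.Set.add ex (fr.fi + 1)
          if fr.fi + 1 = 225 then some g'
          else loopB f g' ex' (⟨fr.fi + 1, getN mn.2 mn.1, 0, 1, some (mn.1, mn.2)⟩ :: fr' :: rest)
        else loopB f g ex (fr' :: rest)
      else
        match fr.undo with
        | none => loopB f g ex rest
        | some (um, un) => loopB f (cellSet g um un (-1)) (PySem.Set.discard ex fr.fi) rest

def solve_alt (grid : List (List Int)) (existing : List Int) (v2 : Int) (v3 : Int) (i : Int) : Option (List (List Int)) :=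
  if i = 225 then some grid
  else loopB (bndB (225 - i).toNat) grid existing [⟨i, getN v2 v3, 0, 1, none⟩]

-- ===== PRECONDITION & SPEC =====
-- Pre-side cell lookup (kept separate from the ports' helpers): grid[m][n], none = IndexError
def preCell (grid : List (List Int)) (m n : Int) : Option Int :=
  (PySem.List.pyGet? grid m).bind fun row => PySem.List.pyGet? row n

-- Pre_ admits the inputs on which A provably returns without an IndexError: the trivial i == 225
-- case; the puzzle's real domain (15×15 grid, v2/v3 in range, 0 ≤ i < 225); and the one-scan case
-- where every neighbour cell of (v2, v3) exists (wraparound included) but none continues the search,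
-- so A returns None after a single scan. Excluded (and cited) are inputs on which A's backtracking
-- search happens to finish on an undersized grid via negative wraparound, and searches started from
-- i < 0 or i > 225, where A also returns None.
def Pre_solve (grid : List (List Int)) (existing : List Int) (v2 : Int) (v3 : Int) (i : Int) : Prop :=
  i = 225 ∨ (0 ≤ i ∧ i < 225 ∧
    ((grid.length = 15 ∧ (∀ row ∈ grid, row.length = 15) ∧
        0 ≤ v2 ∧ v2 < 15 ∧ 0 ≤ v3 ∧ v3 < 15) ∨
     (∀ m ∈ PySem.List.pyRange (if v3 ≤ 0 then v3 else v3 - 1) ((if v3 > 13 then v3 else v3 + 1) + 1) 1,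
      ∀ n ∈ PySem.List.pyRange (if v2 ≤ 0 then v2 else v2 - 1) ((if v2 > 13 then v2 else v2 + 1) + 1) 1,
      (m ≠ v3 ∨ n ≠ v2) →
        (preCell grid m n).isSome = true ∧ preCell grid m n ≠ some (i + 1) ∧
          ((i + 1) ∈ existing ∨ preCell grid m n ≠ some (-1)))))
instance (grid : List (List Int)) (existing : List Int) (v2 : Int) (v3 : Int) (i : Int) : Decidable (Pre_solve grid existing v2 v3 i) := by unfold Pre_solve; infer_instance

def pvWitness_solve : List (List Int) × List Int × Int × Int × Int :=
  (List.replicate 15 (List.replicate 15 (-1)), [], 0, 0, 225)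

def Spec_solve (grid : List (List Int)) (existing : List Int) (v2 : Int) (v3 : Int) (i : Int) (out : Option (List (List Int))) : Prop := out = solve_alt grid existing v2 v3 i
instance (grid : List (List Int)) (existing : List Int) (v2 : Int) (v3 : Int) (i : Int) (out : Option (List (List Int))) : Decidable (Spec_solve grid existing v2 v3 i out) := by unfold Spec_solve; infer_instance

-- ===== CLAIM (what is proved, stated in full; the proofs are below) =====
def Claim_equal_solve : Prop := ∀ (grid : List (List Int)) (existing : List Int) (v2 : Int) (v3 : Int) (i : Int), Dom_solve grid existing v2 v3 i → Pre_solve grid existing v2 v3 i → Spec_solve grid existing v2 v3 i (solve grid existing v2 v3 i)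

-- ===== LEMMAS AND PROOFS =====

-- shapes of the state
def Grid15 (g : List (List Int)) : Prop := g.length = 15 ∧ ∀ r ∈ g, r.length = 15

-- undo application at a pop (mirrors loopB's pop branches)
def appG (u : Option (Int × Int)) (g : List (List Int)) : List (List Int) :=
  match u with
  | none => g
  | some (m, n) => cellSet g m n (-1)
def appE (u : Option (Int × Int)) (ex : List Int) (v : Int) : List Int :=
  match u with
  | none => ex
  | some _ => PySem.Set.discard ex v

lemma loopB_nil (F : Nat) (g : List (List Int)) (ex : List Int) : loopB F g ex [] = none := by
  cases F <;> simp [loopB]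

lemma getN_eq (v2 v3 : Int) : getN v2 v3 =
    (PySem.List.pyRange (if v3 ≤ 0 then v3 else v3 - 1) ((if v3 > 13 then v3 else v3 + 1) + 1) 1).flatMap
      (fun m => ((PySem.List.pyRange (if v2 ≤ 0 then v2 else v2 - 1) ((if v2 > 13 then v2 else v2 + 1) + 1) 1).filter
        (fun n => decide (m ≠ v3 ∨ n ≠ v2))).map (fun n => (m, n))) := by
  unfold getN
  simp only [PySem.List.foldl_append_ite]
  rw [PySem.List.foldl_append_eq_flatMap]
  simp

lemma getN_mem_bounds {v2 v3 m n : Int} (h2 : 0 ≤ v2) (h2' : v2 < 15) (h3 : 0 ≤ v3) (h3' : v3 < 15)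
    (hmem : (m, n) ∈ getN v2 v3) : 0 ≤ m ∧ m < 15 ∧ 0 ≤ n ∧ n < 15 := by
  rw [getN_eq] at hmem
  simp only [List.mem_flatMap, List.mem_map, List.mem_filter, PySem.List.mem_pyRange_one] at hmem
  obtain ⟨a, ⟨ha1, ha2⟩, b, ⟨⟨hb1, hb2⟩, -⟩, heq⟩ := hmem
  obtain ⟨rfl, rfl⟩ := Prod.mk.injEq .. ▸ heq
  constructor <;> [skip; constructor] <;> [skip; skip; constructor] <;> split_ifs at * <;> omega

lemma getN_length_le (v2 v3 : Int) : (getN v2 v3).length ≤ 9 := by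
  rw [getN_eq, List.length_flatMap]
  have hin : ∀ x ∈ ((PySem.List.pyRange (if v3 ≤ 0 then v3 else v3 - 1) ((if v3 > 13 then v3 else v3 + 1) + 1) 1).map
      (fun m => (((PySem.List.pyRange (if v2 ≤ 0 then v2 else v2 - 1) ((if v2 > 13 then v2 else v2 + 1) + 1) 1).filter
        (fun n => decide (m ≠ v3 ∨ n ≠ v2))).map (fun n => (m, n))).length)), x ≤ 3 := by
    intro x hx
    simp only [List.mem_map] at hx
    obtain ⟨a, -, rfl⟩ := hx
    refine le_trans (le_trans (le_of_eq (List.length_map _)) (List.length_filter_le _ _)) ?_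
    rw [PySem.List.length_pyRange_one]; split_ifs <;> omega
  calc _ ≤ _ * 3 := List.sum_le_card_nsmul _ 3 hin
    _ ≤ 3 * 3 := by
        have : (PySem.List.pyRange (if v3 ≤ 0 then v3 else v3 - 1) ((if v3 > 13 then v3 else v3 + 1) + 1) 1).length ≤ 3 := by
          rw [PySem.List.length_pyRange_one]; split_ifs <;> omega
        simp only [List.length_map]; omega
    _ ≤ 9 := by omega

lemma cellGet_eq {g : List (List Int)} {m n : Int} (hg : Grid15 g)
    (hm : 0 ≤ m) (hm' : m < 15) (hn : 0 ≤ n) (hn' : n < 15) :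
    ∃ (hM : m.toNat < g.length), cellGet g m n = some (g[m.toNat][n.toNat]'(by
      have := hg.2 g[m.toNat] (g.getElem_mem _); omega)) := by
  obtain ⟨hlen, hrow⟩ := hg
  have hM : m.toNat < g.length := by omega
  refine ⟨hM, ?_⟩
  have h1 : PySem.List.pyGet? g m = some g[m.toNat] :=
    PySem.List.pyGet?_eq_some_getElem g hm (by exact_mod_cast by omega)
  have hr := hrow g[m.toNat] (g.getElem_mem _)
  have h2 : PySem.List.pyGet? g[m.toNat] n = some (g[m.toNat][n.toNat]'(by omega)) :=
    PySem.List.pyGet?_eq_some_getElem _ hn (by exact_mod_cast by omega)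
  simp [cellGet, h1, h2]

lemma cellSet_eq {g : List (List Int)} {m n : Int} (v : Int) (hg : Grid15 g)
    (hm : 0 ≤ m) (hm' : m < 15) (hn : 0 ≤ n) :
    cellSet g m n v = g.set m.toNat ((g.getD m.toNat []).set n.toNat v) := by
  obtain ⟨hlen, hrow⟩ := hg
  have hM : m.toNat < g.length := by omega
  rw [cellSet, PySem.List.pySetD_of_nonneg _ _ hm, PySem.List.pySetD_of_nonneg _ _ hn,
    PySem.List.pyGetD_eq_getElem g [] hm (by exact_mod_cast by omega)]
  rw [List.getD_eq_getElem g [] hM]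

lemma grid15_cellSet {g : List (List Int)} {m n : Int} (v : Int) (hg : Grid15 g)
    (hm : 0 ≤ m) (hm' : m < 15) (hn : 0 ≤ n) (hn' : n < 15) : Grid15 (cellSet g m n v) := by
  rw [cellSet_eq v hg hm hm' hn]
  obtain ⟨hlen, hrow⟩ := hg
  refine ⟨by simpa using hlen, ?_⟩
  intro r hr
  rcases List.mem_or_eq_of_mem_set hr with h | rfl
  · exact hrow r h
  · rw [List.length_set, List.getD_eq_getElem g [] (by omega)]
    exact hrow _ (g.getElem_mem _)

lemma cellSet_restore {g : List (List Int)} {m n c : Int} (v : Int) (hg : Grid15 g)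
    (hm : 0 ≤ m) (hm' : m < 15) (hn : 0 ≤ n) (hn' : n < 15)
    (hc : cellGet g m n = some c) :
    cellSet (cellSet g m n v) m n c = g := by
  obtain ⟨hM, hget⟩ := cellGet_eq hg hm hm' hn hn'
  have hc' : c = g[m.toNat][n.toNat]'(by have := hg.2 g[m.toNat] (g.getElem_mem _); omega) := by
    rw [hget] at hc; exact (Option.some.injEq _ _ ▸ hc).symm
  subst hc'
  have hg' := grid15_cellSet v hg hm hm' hn hn'
  rw [cellSet_eq v hg hm hm' hn] at hg' ⊢
  rw [cellSet_eq _ hg' hm hm' hn]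
  have hM' : m.toNat < (g.set m.toNat ((g.getD m.toNat []).set n.toNat v)).length := by
    rw [List.length_set]; exact hM
  rw [List.getD_eq_getElem _ [] hM', List.getElem_set_self, List.set_set, List.set_set,
      List.getD_eq_getElem g [] hM]
  have hN : n.toNat < (g[m.toNat]).length := by
    have := hg.2 g[m.toNat] (g.getElem_mem _); omega
  rw [List.set_getElem_self, List.set_getElem_self]

lemma discard_add {ex : List Int} {v : Int} (h : ex.contains v = false) :
    PySem.Set.discard (PySem.Set.add ex v) v = ex := by
  unfold PySem.Set.discard PySem.Set.add
  have hnm : v ∉ ex := by simpa using h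
  rw [if_neg (by simpa using hnm)]
  rw [List.filter_append]
  simp only [List.filter_cons, List.filter_nil]
  rw [List.filter_eq_self.mpr, if_neg (by simp)]
  · simp
  · intro a ha
    simp only [Bool.not_eq_eq_eq_not, Bool.not_true, beq_eq_false_iff_ne]
    intro rfl_eq; subst rfl_eq
    exact hnm ha

lemma getD_append_cons (pre s : List (Int × Int)) (p d : Int × Int) :
    (pre ++ p :: s).getD pre.length d = p := by
  rw [List.getD_eq_getElem?_getD, List.getElem?_append_right (le_refl _)]
  simp

-- one-step unfoldings of the machine, phrased for a frame with a Nat index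
lemma loopB_step1_scan (t : Nat) (g : List (List Int)) (ex : List Int) (i : Int)
    (ns : List (Int × Int)) (j : Nat) (p : Int × Int) (u : Option (Int × Int)) (rest : List BFrame)
    (hj : j < ns.length) (hp : ns.getD j (0, 0) = p) :
    loopB (Nat.succ t) g ex (⟨i, ns, (j : Int), 1, u⟩ :: rest) =
      if cellGet g p.1 p.2 = some (i + 1) then
        if i + 1 = 225 then some g
        else loopB t g ex (⟨i + 1, getN p.2 p.1, 0, 1, none⟩ :: ⟨i, ns, ((j + 1 : Nat) : Int), 1, u⟩ :: rest)
      else loopB t g ex (⟨i, ns, ((j + 1 : Nat) : Int), 1, u⟩ :: rest) := by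
  simp only [loopB, if_true]
  rw [if_pos (show (j : Int) < PySem.List.len ns by rw [PySem.List.len_eq]; exact_mod_cast hj)]
  simp only [PySem.List.pyGetD_natCast, hp]
  norm_num

lemma loopB_step1_end (t : Nat) (g : List (List Int)) (ex : List Int) (i : Int)
    (ns : List (Int × Int)) (u : Option (Int × Int)) (rest : List BFrame) :
    loopB (Nat.succ t) g ex (⟨i, ns, (ns.length : Int), 1, u⟩ :: rest) =
      if ex.contains (i + 1) then loopB t (appG u g) (appE u ex i) rest
      else loopB t g ex (⟨i, ns, 0, 2, u⟩ :: rest) := by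
  simp only [loopB, if_true]
  rw [if_neg (show ¬ ((ns.length : Int) < PySem.List.len ns) by rw [PySem.List.len_eq]; omega)]
  cases u with
  | none => rfl
  | some mn => cases mn; rfl

lemma loopB_step2_scan (t : Nat) (g : List (List Int)) (ex : List Int) (i : Int)
    (ns : List (Int × Int)) (j : Nat) (p : Int × Int) (u : Option (Int × Int)) (rest : List BFrame)
    (hj : j < ns.length) (hp : ns.getD j (0, 0) = p) :
    loopB (Nat.succ t) g ex (⟨i, ns, (j : Int), 2, u⟩ :: rest) =
      if cellGet g p.1 p.2 = some (-1) then
        if i + 1 = 225 then some (cellSet g p.1 p.2 (i + 1))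
        else loopB t (cellSet g p.1 p.2 (i + 1)) (PySem.Set.add ex (i + 1))
          (⟨i + 1, getN p.2 p.1, 0, 1, some (p.1, p.2)⟩ :: ⟨i, ns, ((j + 1 : Nat) : Int), 2, u⟩ :: rest)
      else loopB t g ex (⟨i, ns, ((j + 1 : Nat) : Int), 2, u⟩ :: rest) := by
  simp only [loopB]
  rw [if_neg (show ¬ (2 : Int) = 1 by norm_num)]
  rw [if_pos (show (j : Int) < PySem.List.len ns by rw [PySem.List.len_eq]; exact_mod_cast hj)]
  simp only [PySem.List.pyGetD_natCast, hp]
  norm_num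

lemma loopB_step2_end (t : Nat) (g : List (List Int)) (ex : List Int) (i : Int)
    (ns : List (Int × Int)) (u : Option (Int × Int)) (rest : List BFrame) :
    loopB (Nat.succ t) g ex (⟨i, ns, (ns.length : Int), 2, u⟩ :: rest) =
      loopB t (appG u g) (appE u ex i) rest := by
  simp only [loopB]
  rw [if_neg (show ¬ (2 : Int) = 1 by norm_num)]
  rw [if_neg (show ¬ ((ns.length : Int) < PySem.List.len ns) by rw [PySem.List.len_eq]; omega)]
  cases u with
  | none => rfl
  | some mn => cases mn; rfl

-- the simulation: a frame pushed for A's call  solveA (f+1) g ex v2 v3 i  runs, under exact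
-- step fuel k, to A's result; on failure it pops, applying its undo to the unchanged g/ex.
lemma simP : ∀ f : Nat, ∀ (g : List (List Int)) (ex : List Int) (v2 v3 i : Int),
    Grid15 g → 0 ≤ v2 → v2 < 15 → 0 ≤ v3 → v3 < 15 → i < 225 → (225 - i).toNat ≤ f →
    ∃ k ≤ bndB f, ∀ (u : Option (Int × Int)) (rest : List BFrame) (F : Nat),
      loopB (k + F) g ex (⟨i, getN v2 v3, 0, 1, u⟩ :: rest)
        = match solveA (f + 1) g ex v2 v3 i with
          | some r => some r
          | none => loopB F (appG u g) (appE u ex i) rest := by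
  intro f
  induction f with
  | zero =>
    intro g ex v2 v3 i _ _ _ _ _ hi hf
    exfalso; omega
  | succ f IH =>
    intro g ex v2 v3 i hg hv2 hv2' hv3 hv3' hi hf
    have hnb : ∀ p ∈ getN v2 v3, 0 ≤ p.1 ∧ p.1 < 15 ∧ 0 ≤ p.2 ∧ p.2 < 15 := by
      intro p hp
      obtain ⟨m, n⟩ := p
      exact getN_mem_bounds hv2 hv2' hv3 hv3' hp
    have hlen9 := getN_length_le v2 v3
    have hsA : solveA (f + 1 + 1) g ex v2 v3 i
        = match ph1 (f + 1) g ex i (getN v2 v3) with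
          | some r => some r
          | none => if ex.contains (i + 1) then none else ph2 (f + 1) g ex i (getN v2 v3) := by
      simp only [solveA]
      rw [if_neg (show ¬ i = 225 by omega)]
    -- phase-1 scan simulation
    have hQ1 : ∀ (s pre : List (Int × Int)),
        (∀ p ∈ s, 0 ≤ p.1 ∧ p.1 < 15 ∧ 0 ≤ p.2 ∧ p.2 < 15) →
        ∃ k ≤ s.length * (bndB f + 1), ∀ (u : Option (Int × Int)) (rest : List BFrame) (F : Nat),
          loopB (k + F) g ex (⟨i, pre ++ s, (pre.length : Int), 1, u⟩ :: rest)
            = match ph1 (f + 1) g ex i s with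
              | some r => some r
              | none => loopB F g ex (⟨i, pre ++ s, ((pre ++ s).length : Int), 1, u⟩ :: rest) := by
      intro s
      induction s with
      | nil =>
        intro pre _
        refine ⟨0, by omega, fun u rest F => ?_⟩
        simp [ph1]
      | cons p s' IHs =>
        obtain ⟨m, n⟩ := p
        intro pre hs
        have hb := hs (m, n) (by simp)
        have hlt : pre.length < (pre ++ (m, n) :: s').length := by simp
        have hgd : (pre ++ (m, n) :: s').getD pre.length (0, 0) = (m, n) :=
          getD_append_cons pre s' (m, n) (0, 0)
        obtain ⟨kt, hkt, ht⟩ := IHs (pre ++ [(m, n)]) (fun q hq => hs q (by simp [hq]))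
        simp only [List.append_assoc, List.singleton_append, List.length_append,
          List.length_cons, List.length_nil] at ht
        have hexp : (s'.length + 1) * (bndB f + 1) = s'.length * (bndB f + 1) + (bndB f + 1) := by
          ring
        have hph1 : ph1 (f + 1) g ex i ((m, n) :: s')
            = if cellGet g m n = some (i + 1) then
                match solveA (f + 1) g ex n m (i + 1) with
                | some r => some r
                | none => ph1 (f + 1) g ex i s'
              else ph1 (f + 1) g ex i s' := by
          simp only [ph1]
        by_cases hcell : cellGet g m n = some (i + 1)
        · by_cases h225 : i + 1 = 225
          · refine ⟨1, by simp only [List.length_cons]; omega, fun u rest F => ?_⟩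
            have h1F : 1 + F = Nat.succ F := by omega
            rw [h1F, loopB_step1_scan F g ex i _ pre.length (m, n) u rest hlt hgd]
            rw [if_pos hcell, if_pos h225]
            have hA : solveA (f + 1) g ex n m (i + 1) = some g := by
              simp only [solveA]
              rw [if_pos h225]
            rw [hph1, if_pos hcell, hA]
          · have hbnd : (225 - (i + 1)).toNat ≤ f := by omega
            obtain ⟨kc, hkc, hc⟩ := IH g ex n m (i + 1) hg hb.2.2.1 hb.2.2.2 hb.1 hb.2.1
              (by omega) hbnd
            refine ⟨1 + kc + kt, by simp only [List.length_cons]; omega, fun u rest F => ?_⟩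
            have h1F : (1 + kc + kt) + F = Nat.succ (kc + (kt + F)) := by omega
            rw [h1F, loopB_step1_scan _ g ex i _ pre.length (m, n) u rest hlt hgd]
            rw [if_pos hcell, if_neg h225]
            rw [hc none _ (kt + F)]
            rw [hph1, if_pos hcell]
            cases hA : solveA (f + 1) g ex n m (i + 1) with
            | some r => simp
            | none =>
              simp only [appG, appE]
              simp only [List.length_append, List.length_cons] at ht ⊢
              rw [ht u rest F]
        · refine ⟨1 + kt, by simp only [List.length_cons]; omega, fun u rest F => ?_⟩
          have h1F : (1 + kt) + F = Nat.succ (kt + F) := by omega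
          rw [h1F, loopB_step1_scan _ g ex i _ pre.length (m, n) u rest hlt hgd]
          rw [if_neg hcell]
          rw [hph1, if_neg hcell]
          simp only [List.length_append, List.length_cons] at ht ⊢
          rw [ht u rest F]
    -- phase-2 scan simulation
    have hQ2 : ∀ (s pre : List (Int × Int)),
        (∀ p ∈ s, 0 ≤ p.1 ∧ p.1 < 15 ∧ 0 ≤ p.2 ∧ p.2 < 15) →
        ex.contains (i + 1) = false →
        ∃ k ≤ s.length * (bndB f + 1) + 1, ∀ (u : Option (Int × Int)) (rest : List BFrame) (F : Nat),
          loopB (k + F) g ex (⟨i, pre ++ s, (pre.length : Int), 2, u⟩ :: rest)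
            = match ph2 (f + 1) g ex i s with
              | some r => some r
              | none => loopB F (appG u g) (appE u ex i) rest := by
      intro s
      induction s with
      | nil =>
        intro pre _ _
        refine ⟨1, by omega, fun u rest F => ?_⟩
        have h1F : 1 + F = Nat.succ F := by omega
        rw [h1F]
        have := loopB_step2_end F g ex i (pre ++ []) u rest
        simp only [List.append_nil] at this ⊢
        rw [this]
        simp [ph2]
      | cons p s' IHs =>
        obtain ⟨m, n⟩ := p
        intro pre hs hexc
        have hb := hs (m, n) (by simp)
        have hlt : pre.length < (pre ++ (m, n) :: s').length := by simp
        have hgd : (pre ++ (m, n) :: s').getD pre.length (0, 0) = (m, n) :=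
          getD_append_cons pre s' (m, n) (0, 0)
        obtain ⟨kt, hkt, ht⟩ := IHs (pre ++ [(m, n)]) (fun q hq => hs q (by simp [hq])) hexc
        simp only [List.append_assoc, List.singleton_append, List.length_append,
          List.length_cons, List.length_nil] at ht
        have hexp : (s'.length + 1) * (bndB f + 1) = s'.length * (bndB f + 1) + (bndB f + 1) := by
          ring
        have hph2 : ph2 (f + 1) g ex i ((m, n) :: s')
            = if cellGet g m n = some (-1) then
                match solveA (f + 1) (cellSet g m n (i + 1)) (PySem.Set.add ex (i + 1)) n m (i + 1) with
                | some r => some r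
                | none => ph2 (f + 1) g ex i s'
              else ph2 (f + 1) g ex i s' := by
          simp only [ph2]
        by_cases hcell : cellGet g m n = some (-1)
        · by_cases h225 : i + 1 = 225
          · refine ⟨1, by simp only [List.length_cons]; omega, fun u rest F => ?_⟩
            have h1F : 1 + F = Nat.succ F := by omega
            rw [h1F, loopB_step2_scan F g ex i _ pre.length (m, n) u rest hlt hgd]
            rw [if_pos hcell, if_pos h225]
            have hA : solveA (f + 1) (cellSet g m n (i + 1)) (PySem.Set.add ex (i + 1)) n m (i + 1)
                = some (cellSet g m n (i + 1)) := by
              simp only [solveA]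
              rw [if_pos h225]
            rw [hph2, if_pos hcell, hA]
          · have hbnd : (225 - (i + 1)).toNat ≤ f := by omega
            have hg' : Grid15 (cellSet g m n (i + 1)) :=
              grid15_cellSet (i + 1) hg hb.1 hb.2.1 hb.2.2.1 hb.2.2.2
            obtain ⟨kc, hkc, hc⟩ := IH (cellSet g m n (i + 1)) (PySem.Set.add ex (i + 1))
              n m (i + 1) hg' hb.2.2.1 hb.2.2.2 hb.1 hb.2.1 (by omega) hbnd
            refine ⟨1 + kc + kt, by simp only [List.length_cons]; omega, fun u rest F => ?_⟩
            have h1F : (1 + kc + kt) + F = Nat.succ (kc + (kt + F)) := by omega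
            rw [h1F, loopB_step2_scan _ g ex i _ pre.length (m, n) u rest hlt hgd]
            rw [if_pos hcell, if_neg h225]
            rw [hc (some (m, n)) _ (kt + F)]
            rw [hph2, if_pos hcell]
            cases hA : solveA (f + 1) (cellSet g m n (i + 1)) (PySem.Set.add ex (i + 1)) n m (i + 1) with
            | some r => simp
            | none =>
              simp only [appG, appE]
              rw [cellSet_restore (i + 1) hg hb.1 hb.2.1 hb.2.2.1 hb.2.2.2 hcell]
              rw [discard_add hexc]
              rw [ht u rest F]
              rcases u with _ | ⟨um, un⟩ <;> rfl
        · refine ⟨1 + kt, by simp only [List.length_cons]; omega, fun u rest F => ?_⟩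
          have h1F : (1 + kt) + F = Nat.succ (kt + F) := by omega
          rw [h1F, loopB_step2_scan _ g ex i _ pre.length (m, n) u rest hlt hgd]
          rw [if_neg hcell]
          rw [hph2, if_neg hcell]
          rw [ht u rest F]
    -- assemble the frame's run
    obtain ⟨k1, hk1, hQ1'⟩ := hQ1 (getN v2 v3) [] hnb
    simp only [List.nil_append, List.length_nil, Nat.cast_zero] at hQ1'
    have hk1' : k1 ≤ 9 * (bndB f + 1) :=
      le_trans hk1 (Nat.mul_le_mul_right _ hlen9)
    have hbndB : bndB (f + 1) = 18 * bndB f + 20 := rfl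
    by_cases hexc : ex.contains (i + 1)
    · refine ⟨k1 + 1, by omega, fun u rest F => ?_⟩
      have h1F : (k1 + 1) + F = k1 + Nat.succ F := by omega
      rw [h1F, hQ1' u rest (Nat.succ F)]
      rw [hsA]
      cases hA : ph1 (f + 1) g ex i (getN v2 v3) with
      | some r => simp
      | none =>
        simp only []
        rw [loopB_step1_end F g ex i _ u rest, if_pos hexc, if_pos hexc]
    · obtain ⟨k2, hk2, hQ2'⟩ := hQ2 (getN v2 v3) [] hnb (by simpa using hexc)
      simp only [List.nil_append, List.length_nil, Nat.cast_zero] at hQ2'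
      have hk2' : k2 ≤ 9 * (bndB f + 1) + 1 :=
        le_trans hk2 (by have := Nat.mul_le_mul_right (bndB f + 1) hlen9; omega)
      refine ⟨k1 + 1 + k2, by omega, fun u rest F => ?_⟩
      have h1F : (k1 + 1 + k2) + F = k1 + Nat.succ (k2 + F) := by omega
      rw [h1F, hQ1' u rest (Nat.succ (k2 + F))]
      rw [hsA]
      cases hA : ph1 (f + 1) g ex i (getN v2 v3) with
      | some r => simp
      | none =>
        simp only []
        rw [loopB_step1_end (k2 + F) g ex i _ u rest, if_neg hexc]
        rw [hQ2' u rest F]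
        rw [if_neg hexc]

-- the one-scan case: no neighbour cell continues the search
lemma scan_ph1_none (fuel : Nat) (g : List (List Int)) (ex : List Int) (i : Int) :
    ∀ s : List (Int × Int), (∀ p ∈ s, cellGet g p.1 p.2 ≠ some (i + 1)) →
    ph1 fuel g ex i s = none := by
  intro s
  induction s with
  | nil => intro _; simp [ph1]
  | cons p s' IHs =>
    obtain ⟨m, n⟩ := p
    intro h
    simp only [ph1]
    rw [if_neg (h (m, n) (by simp))]
    exact IHs (fun q hq => h q (by simp [hq]))

lemma scan_ph2_none (fuel : Nat) (g : List (List Int)) (ex : List Int) (i : Int) :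
    ∀ s : List (Int × Int), (∀ p ∈ s, cellGet g p.1 p.2 ≠ some (-1)) →
    ph2 fuel g ex i s = none := by
  intro s
  induction s with
  | nil => intro _; simp [ph2]
  | cons p s' IHs =>
    obtain ⟨m, n⟩ := p
    intro h
    simp only [ph2]
    rw [if_neg (h (m, n) (by simp))]
    exact IHs (fun q hq => h q (by simp [hq]))

lemma mscan1 (g : List (List Int)) (ex : List Int) (i : Int) :
    ∀ (s pre : List (Int × Int)) (u : Option (Int × Int)) (rest : List BFrame),
    (∀ p ∈ s, cellGet g p.1 p.2 ≠ some (i + 1)) →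
    ∀ F, loopB (s.length + F) g ex (⟨i, pre ++ s, (pre.length : Int), 1, u⟩ :: rest)
        = loopB F g ex (⟨i, pre ++ s, ((pre ++ s).length : Int), 1, u⟩ :: rest) := by
  intro s
  induction s with
  | nil => intro pre u rest _ F; simp
  | cons p s' IHs =>
    obtain ⟨m, n⟩ := p
    intro pre u rest h F
    have hlt : pre.length < (pre ++ (m, n) :: s').length := by simp
    have hgd : (pre ++ (m, n) :: s').getD pre.length (0, 0) = (m, n) :=
      getD_append_cons pre s' (m, n) (0, 0)
    have h1F : ((m, n) :: s').length + F = Nat.succ (s'.length + F) := by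
      simp only [List.length_cons]; omega
    rw [h1F, loopB_step1_scan _ g ex i _ pre.length (m, n) u rest hlt hgd]
    rw [if_neg (h (m, n) (by simp))]
    have ht := IHs (pre ++ [(m, n)]) u rest (fun q hq => h q (by simp [hq])) F
    simp only [List.append_assoc, List.singleton_append, List.length_append,
      List.length_cons, List.length_nil] at ht ⊢
    exact ht

lemma mscan2 (g : List (List Int)) (ex : List Int) (i : Int) :
    ∀ (s pre : List (Int × Int)) (u : Option (Int × Int)) (rest : List BFrame),
    (∀ p ∈ s, cellGet g p.1 p.2 ≠ some (-1)) →
    ∀ F, loopB (s.length + F) g ex (⟨i, pre ++ s, (pre.length : Int), 2, u⟩ :: rest)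
        = loopB F g ex (⟨i, pre ++ s, ((pre ++ s).length : Int), 2, u⟩ :: rest) := by
  intro s
  induction s with
  | nil => intro pre u rest _ F; simp
  | cons p s' IHs =>
    obtain ⟨m, n⟩ := p
    intro pre u rest h F
    have hlt : pre.length < (pre ++ (m, n) :: s').length := by simp
    have hgd : (pre ++ (m, n) :: s').getD pre.length (0, 0) = (m, n) :=
      getD_append_cons pre s' (m, n) (0, 0)
    have h1F : ((m, n) :: s').length + F = Nat.succ (s'.length + F) := by
      simp only [List.length_cons]; omega
    rw [h1F, loopB_step2_scan _ g ex i _ pre.length (m, n) u rest hlt hgd]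
    rw [if_neg (h (m, n) (by simp))]
    have ht := IHs (pre ++ [(m, n)]) u rest (fun q hq => h q (by simp [hq])) F
    simp only [List.append_assoc, List.singleton_append, List.length_append,
      List.length_cons, List.length_nil] at ht ⊢
    exact ht

lemma preCell_eq_cellGet (g : List (List Int)) (m n : Int) : preCell g m n = cellGet g m n := rfl

-- ===== VERDICT (by name: the statement is the Claim_ definition above) =====
theorem solve_spec : Claim_equal_solve := by
  intro grid existing v2 v3 i _ hpre
  unfold Spec_solve
  by_cases h225 : i = 225
  · subst h225
    unfold solve solve_alt
    norm_num
    simp [solveA]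
  · rcases hpre with h | ⟨hi0, hi, h15 | hscan⟩
    · exact absurd h h225
    · -- the 15×15 search: the frame-stack machine simulates A's recursion
      obtain ⟨hlen, hrow, hv2, hv2', hv3, hv3'⟩ := h15
      obtain ⟨k, hk, hsim⟩ := simP (225 - i).toNat grid existing v2 v3 i ⟨hlen, hrow⟩
        hv2 hv2' hv3 hv3' hi (le_refl _)
      unfold solve solve_alt
      rw [if_neg h225]
      have hfuel : bndB (225 - i).toNat = k + (bndB (225 - i).toNat - k) := by omega
      rw [hfuel, hsim none [] _]
      simp only [appG, appE]
      cases hA : solveA ((225 - i).toNat + 1) grid existing v2 v3 i with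
      | some r => rfl
      | none => rw [loopB_nil]
    · -- the one-scan case: both sides return none
      have hcells : ∀ p ∈ getN v2 v3,
          (cellGet grid p.1 p.2).isSome = true ∧ cellGet grid p.1 p.2 ≠ some (i + 1) ∧
            ((i + 1) ∈ existing ∨ cellGet grid p.1 p.2 ≠ some (-1)) := by
        intro p hp
        rw [getN_eq] at hp
        simp only [List.mem_flatMap, List.mem_map, List.mem_filter] at hp
        obtain ⟨m, hm, n, ⟨hn, hguard⟩, rfl⟩ := hp
        have := hscan m hm n hn (by simpa using of_decide_eq_true hguard)
        simpa only [preCell_eq_cellGet] using this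
      have h1 : ∀ p ∈ getN v2 v3, cellGet grid p.1 p.2 ≠ some (i + 1) :=
        fun p hp => (hcells p hp).2.1
      have ht1 : 1 ≤ (225 - i).toNat := by omega
      have hb20 : 20 ≤ bndB (225 - i).toNat := by
        cases h : (225 - i).toNat with
        | zero => omega
        | succ t' => rw [bndB]; omega
      have hL := getN_length_le v2 v3
      have hsolveA : solve grid existing v2 v3 i
          = if existing.contains (i + 1) then none
            else ph2 ((225 - i).toNat) grid existing i (getN v2 v3) := by
        unfold solve
        simp only [solveA]
        rw [if_neg h225, scan_ph1_none _ _ _ _ _ h1]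
      unfold solve_alt
      rw [if_neg h225]
      by_cases hex : existing.contains (i + 1)
      · -- pop right after the phase-1 scan
        have hm1 := mscan1 grid existing i (getN v2 v3) [] none []
          h1 (1 + (bndB (225 - i).toNat - (getN v2 v3).length - 1))
        simp only [List.nil_append, List.length_nil, Nat.cast_zero] at hm1
        have hfuel : bndB (225 - i).toNat
            = (getN v2 v3).length + (1 + (bndB (225 - i).toNat - (getN v2 v3).length - 1)) := by
          omega
        rw [hsolveA, if_pos hex, hfuel, hm1]
        have hstep : 1 + (bndB (225 - i).toNat - (getN v2 v3).length - 1)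
            = Nat.succ (bndB (225 - i).toNat - (getN v2 v3).length - 1) := by omega
        rw [hstep, loopB_step1_end _ grid existing i _ none [], if_pos hex]
        simp only [appG, appE]
        rw [loopB_nil]
      · -- scan phase 2 as well, then pop
        have h2 : ∀ p ∈ getN v2 v3, cellGet grid p.1 p.2 ≠ some (-1) := by
          intro p hp
          rcases (hcells p hp).2.2 with hin | hne
          · exact absurd (List.contains_iff_mem.mpr hin) (by simpa using hex)
          · exact hne
        have hsolve : solve grid existing v2 v3 i = none := by
          rw [hsolveA, if_neg hex, scan_ph2_none _ _ _ _ _ h2]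
        set L := (getN v2 v3).length with hLdef
        set Z := bndB (225 - i).toNat - 2 * L - 2 with hZdef
        have hm1 := mscan1 grid existing i (getN v2 v3) [] none [] h1 (1 + (L + (1 + Z)))
        simp only [List.nil_append, List.length_nil, Nat.cast_zero] at hm1
        have hfuel : bndB (225 - i).toNat = L + (1 + (L + (1 + Z))) := by omega
        rw [hsolve, hfuel, hm1]
        have hstep : 1 + (L + (1 + Z)) = Nat.succ (L + (1 + Z)) := by omega
        rw [hstep, loopB_step1_end _ grid existing i _ none [], if_neg (by simpa using hex)]
        have hm2 := mscan2 grid existing i (getN v2 v3) [] none [] h2 (1 + Z)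
        simp only [List.nil_append, List.length_nil, Nat.cast_zero] at hm2
        rw [hm2]
        have hstep2 : 1 + Z = Nat.succ Z := by omega
        rw [hstep2, loopB_step2_end Z grid existing i _ none []]
        simp only [appG, appE]
        rw [loopB_nil]
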